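-- pv_equiv track=rewrite | github.com/bharathi0811/Equilibrium_count | equilibrium_index.py | equilibrium_count
-- ===== SOURCE A (Python) =====
-- def equilibrium_count(array):
--     n = len(array)
--     count=0
--     for i in range(n):
--         sum_left = 0
--         sum_right = 0
--         if i ==0:
--             sum_left=array[0]
--         else:
--             for k in array[0:i]:
--                 sum_left += k
--         if i == n-1:
--             sum_right=array[n-1]
--         else:
--             for m in array[i + 1:n]:
--                 sum_right += m
--
--         if sum_left==sum_right:
--             count+=1
--     return count
-- ===== SOURCE B (Python) =====
-- def equilibrium_count(array):
--     # One pass with running prefix sum; first and last index use the element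
--     # itself as A's definition does.
--     n = len(array)
--     total = sum(array)
--     count = 0
--     left = 0
--     for i, x in enumerate(array):
--         L = array[0] if i == 0 else left
--         R = array[n - 1] if i == n - 1 else total - left - x
--         if L == R:
--             count += 1
--         left += x
--     return count
-- ===== Notes on version B (the rewrite author's own statement) =====
-- stated objective: faster
-- what changed: Replaces A's per-index re-summation of the left and right slices (two inner loops per index) with a single pass keeping a running prefix sum and the precomputed total, preserving A's special rule that the first index uses the first element as its left sum and the last index uses the last element as its right sum.
import Mathlib
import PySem

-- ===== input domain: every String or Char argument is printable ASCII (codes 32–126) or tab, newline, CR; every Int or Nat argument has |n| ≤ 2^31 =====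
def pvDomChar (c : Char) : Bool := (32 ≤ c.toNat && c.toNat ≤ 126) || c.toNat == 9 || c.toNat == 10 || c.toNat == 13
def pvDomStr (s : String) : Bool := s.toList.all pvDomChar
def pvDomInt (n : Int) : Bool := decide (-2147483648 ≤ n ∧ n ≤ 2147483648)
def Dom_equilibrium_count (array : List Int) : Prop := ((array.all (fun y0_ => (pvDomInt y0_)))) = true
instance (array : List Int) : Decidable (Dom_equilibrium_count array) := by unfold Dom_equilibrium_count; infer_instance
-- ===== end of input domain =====

-- B replaces A's per-index re-summation of both slices by a single pass with a running
-- prefix sum (objective: faster, O(n) instead of O(n^2)); same first/last-index rule as A.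


-- ===== PORT A =====
-- literal port of A; pyGetD's default 0 is never used: the first/last element is
-- only read when the loop runs, i.e. when the index is in range.
def equilibrium_count (array : List Int) : Int :=
  let n : Int := PySem.List.len array
  (PySem.List.pyRange 0 n 1).foldl (fun count i =>
    let sum_left : Int :=
      if i = 0 then PySem.List.pyGetD array 0 0
      else (PySem.List.slice array (some 0) (some i)).foldl (fun s k => s + k) 0
    let sum_right : Int :=
      if i = n - 1 then PySem.List.pyGetD array (n - 1) 0
      else (PySem.List.slice array (some (i + 1)) (some n)).foldl (fun s m => s + m) 0
    if sum_left = sum_right then count + 1 else count) 0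

-- ===== PORT B =====
-- literal port of Source B: one pass over enumerate(array) with running prefix sum.
def equilibrium_count_alt (array : List Int) : Int :=
  let n : Int := PySem.List.len array
  let total : Int := array.sum
  let res :=
    (PySem.List.enumerate array).foldl (fun (st : Int × Int) ix =>
      let count := st.1
      let left := st.2
      let i := ix.1
      let x := ix.2
      let L : Int := if i = 0 then PySem.List.pyGetD array 0 0 else left
      let R : Int := if i = n - 1 then PySem.List.pyGetD array (n - 1) 0 else total - left - x
      (if L = R then count + 1 else count, left + x)) (0, 0)
  res.1

-- ===== PRECONDITION & SPEC =====
def Spec_equilibrium_count (array : List Int) (out : Int) : Prop := out = equilibrium_count_alt array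
instance (array : List Int) (out : Int) : Decidable (Spec_equilibrium_count array out) := by unfold Spec_equilibrium_count; infer_instance

-- ===== CLAIM (what is proved, stated in full; the proofs are below) =====
def Claim_equal_equilibrium_count : Prop := ∀ (array : List Int), Dom_equilibrium_count array → Spec_equilibrium_count array (equilibrium_count array)

-- ===== LEMMAS AND PROOFS =====

-- the common characterisation: index i of a counts iff pvP a i
def pvP (a : List Int) (i : Nat) : Bool :=
  decide ((if i = 0 then a.getD 0 0 else (a.take i).sum)
        = (if i = a.length - 1 then a.getD (a.length - 1) 0 else (a.drop (i + 1)).sum))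

lemma pv_sum_take_succ (a : List Int) (k : Nat) (hk : k < a.length) :
    (a.take (k + 1)).sum = (a.take k).sum + a.getD k 0 := by
  have h : a[k]? = some a[k] := List.getElem?_eq_getElem hk
  rw [List.take_add_one, List.sum_append, h]
  simp [List.getD, h]

lemma pv_sum_drop (a : List Int) (k : Nat) (hk : k < a.length) :
    a.sum - (a.take k).sum - a.getD k 0 = (a.drop (k + 1)).sum := by
  have h1 := List.sum_take_add_sum_drop a k
  have h2 := List.drop_eq_getElem_cons hk
  have h3 : a.getD k 0 = a[k] := by simp [List.getD, List.getElem?_eq_getElem hk]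
  rw [h3]
  have : (a.drop k).sum = a[k] + (a.drop (k + 1)).sum := by rw [h2, List.sum_cons]
  omega

lemma pv_getD_last (a : List Int) (h : a ≠ []) :
    PySem.List.pyGetD a ((a.length : Int) - 1) 0 = a.getD (a.length - 1) 0 := by
  have hl : 0 < a.length := List.length_pos_iff.mpr h
  have : ((a.length : Int) - 1) = ((a.length - 1 : Nat) : Int) := by omega
  rw [this, PySem.List.pyGetD_natCast]

-- A's port equals the countP characterisation
lemma pv_A_eq (a : List Int) :
    equilibrium_count a = ((List.range a.length).countP (pvP a) : Int) := by
  unfold equilibrium_count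
  simp only [PySem.List.len_eq, PySem.List.pyRange_zero_nat, List.foldl_map]
  rw [PySem.List.foldl_congr_mem _ _
      (fun (count : Int) (k : Nat) => if pvP a k then count + 1 else count) _ ?_]
  · rw [PySem.List.foldl_if_add_one]; ring
  · intro count k hk
    rw [List.mem_range] at hk
    have hne : a ≠ [] := by intro h; subst h; simp at hk
    have hcast0 : ((k : Int) = 0) ↔ k = 0 := by omega
    have hcastl : ((k : Int) = (a.length : Int) - 1) ↔ k = a.length - 1 := by omega
    have hsl : PySem.List.slice a (some 0) (some (k : Int)) = a.take k := by
      rw [PySem.List.slice_zero_start, PySem.List.slice_to_natCast]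
    have hsr : PySem.List.slice a (some ((k : Int) + 1)) (some (a.length : Int)) = a.drop (k + 1) := by
      have : ((k : Int) + 1) = ((k + 1 : Nat) : Int) := by omega
      rw [this, PySem.List.slice_natCast, List.take_of_length_le (by simp)]
    have hsum : ∀ (l : List Int), l.foldl (fun s x => s + x) 0 = l.sum := by
      intro l; rw [PySem.List.foldl_add (g := fun x => x)]; simp
    simp only [hsl, hsr, hsum, hcast0, hcastl, PySem.List.pyGetD_zero, pv_getD_last a hne, pvP]
    split_ifs with h1 h2 h2 <;> simp_all

-- the Nat-index step function B's fold reduces to after enumerate → range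
def pvStepN (a : List Int) (st : Int × Int) (k : Nat) : Int × Int :=
  (if (if (k : Int) = 0 then a.getD 0 0 else st.2)
      = (if (k : Int) = (a.length : Int) - 1 then PySem.List.pyGetD a ((a.length : Int) - 1) 0
         else a.sum - st.2 - a.getD k 0)
   then st.1 + 1 else st.1,
   st.2 + a.getD k 0)

lemma pv_B_loop (a : List Int) : ∀ (m k : Nat) (c : Int), k + m = a.length →
    ((List.range' k m).foldl (pvStepN a) (c, (a.take k).sum)).1
      = c + ((List.range' k m).countP (pvP a) : Int) := by
  intro m
  induction m with
  | zero => intro k c _; simp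
  | succ m ih =>
    intro k c hkm
    have hk : k < a.length := by omega
    have hne : a ≠ [] := by intro h; subst h; simp at hk
    rw [List.range'_succ, List.foldl_cons, List.countP_cons]
    have hstep : pvStepN a (c, (a.take k).sum) k
        = ((if pvP a k then c + 1 else c), (a.take (k + 1)).sum) := by
      unfold pvStepN pvP
      have hcast0 : ((k : Int) = 0) ↔ k = 0 := by omega
      have hcastl : ((k : Int) = (a.length : Int) - 1) ↔ k = a.length - 1 := by omega
      simp only [hcast0, hcastl, pv_getD_last a hne, pv_sum_drop a k hk,
        pv_sum_take_succ a k hk]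
      split_ifs with h1 h2 h2 <;> simp_all
    rw [hstep]
    by_cases hp : pvP a k <;>
      simp only [hp, if_pos, ih (k + 1) _ (by omega)] <;> push_cast <;> ring

-- B's port equals the countP characterisation
lemma pv_B_eq (a : List Int) :
    equilibrium_count_alt a = ((List.range a.length).countP (pvP a) : Int) := by
  unfold equilibrium_count_alt
  simp only [PySem.List.len_eq]
  rw [PySem.List.enumerate_eq_map_pyRange a 0]
  simp only [PySem.List.len_eq, PySem.List.pyRange_zero_nat, List.foldl_map]
  have hbody : ∀ (st : Int × Int) (k : Nat), k ∈ List.range a.length →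
      (fun (st : Int × Int) (k : Nat) =>
        (if (if (k : Int) = 0 then PySem.List.pyGetD a 0 0 else st.2)
            = (if (k : Int) = (a.length : Int) - 1 then PySem.List.pyGetD a ((a.length : Int) - 1) 0
               else a.sum - st.2 - PySem.List.pyGetD a (k : Int) 0)
         then st.1 + 1 else st.1, st.2 + PySem.List.pyGetD a (k : Int) 0)) st k
      = pvStepN a st k := by
    intro st k _
    simp [pvStepN, PySem.List.pyGetD_zero]
  rw [PySem.List.foldl_congr_mem _ _ (pvStepN a) _ hbody]
  have := pv_B_loop a a.length 0 0 (by omega)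
  simpa [List.range_eq_range'] using this

-- ===== VERDICT (by name: the statement is the Claim_ definition above) =====
theorem equilibrium_count_spec : Claim_equal_equilibrium_count := by
  intro array _
  unfold Spec_equilibrium_count
  rw [pv_A_eq, pv_B_eq]
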